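-- pv_equiv track=rewrite | github.com/modeseven-lfreleng-actions/semantic-tag-increment | tests/scripts/performance_test.py | generate_test_versions
-- ===== SOURCE A (Python) =====
-- def generate_test_versions(count: int) -> list[str]:
--     """Generate a large set of test version strings."""
--     versions = []
--     for major in range(10):
--         for minor in range(10):
--             for patch in range(count // 100):
--                 versions.append(f"v{major}.{minor}.{patch}")
--                 if len(versions) >= count:
--                     return versions
--     return versions
-- ===== SOURCE B (Python) =====
-- def generate_test_versions(count: int) -> list[str]:
--     """Generate a large set of test version strings."""
--     p = count // 100
--     n = min(count, 100 * p)
--     return [f"v{i // (p * 10)}.{(i // p) % 10}.{i % p}" for i in range(n)]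
-- ===== Notes on version B (the rewrite author's own statement) =====
-- stated objective: simpler
-- what changed: Replaces the three nested loops with early-return sentinel by one flat loop over N = min(count, 100*(count//100)) that decodes each index i into major/minor/patch coordinates by division and modulo.
import Mathlib
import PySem

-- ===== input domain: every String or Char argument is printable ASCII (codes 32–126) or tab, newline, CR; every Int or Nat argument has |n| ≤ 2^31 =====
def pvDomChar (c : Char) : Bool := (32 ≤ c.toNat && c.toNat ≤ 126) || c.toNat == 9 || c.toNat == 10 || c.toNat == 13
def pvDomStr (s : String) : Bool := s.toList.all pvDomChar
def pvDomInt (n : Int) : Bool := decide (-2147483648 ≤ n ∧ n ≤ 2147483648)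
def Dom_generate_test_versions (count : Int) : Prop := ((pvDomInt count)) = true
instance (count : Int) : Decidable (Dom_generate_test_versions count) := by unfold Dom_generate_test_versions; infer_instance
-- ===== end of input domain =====

-- B replaces A's three nested loops with early-return sentinel by one flat loop over a
-- precomputed length that decodes each index into major/minor/patch by division and modulo.

-- ===== PORT A =====
-- f"v{major}.{minor}.{patch}"
def pvStr (major minor patch : Int) : String :=
  "v" ++ PySem.Int.toStr major ++ "." ++ PySem.Int.toStr minor ++ "." ++ PySem.Int.toStr patch

-- innermost `for patch in range(count // 100)` loop; Bool = "early return taken"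
def pvPatchLoop (count major minor : Int) : List Int → List String → List String × Bool
  | [], acc => (acc, false)
  | patch :: rest, acc =>
    let acc' := acc ++ [pvStr major minor patch]
    if count ≤ (acc'.length : Int) then (acc', true)
    else pvPatchLoop count major minor rest acc'

-- `for minor in range(10)` loop
def pvMinorLoop (count major : Int) : List Int → List String → List String × Bool
  | [], acc => (acc, false)
  | minor :: rest, acc =>
    let r := pvPatchLoop count major minor (PySem.List.pyRange 0 (PySem.Int.floordiv count 100) 1) acc
    if r.2 then r else pvMinorLoop count major rest r.1

-- `for major in range(10)` loop
def pvMajorLoop (count : Int) : List Int → List String → List String × Bool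
  | [], acc => (acc, false)
  | major :: rest, acc =>
    let r := pvMinorLoop count major (PySem.List.pyRange 0 10 1) acc
    if r.2 then r else pvMajorLoop count rest r.1

def generate_test_versions (count : Int) : List String :=
  (pvMajorLoop count (PySem.List.pyRange 0 10 1) []).1

-- ===== PORT B =====
def generate_test_versions_alt (count : Int) : List String :=
  let p := PySem.Int.floordiv count 100
  let n := min count (100 * p)
  (PySem.List.pyRange 0 n 1).map (fun i =>
    "v" ++ PySem.Int.toStr (PySem.Int.floordiv i (p * 10)) ++ "." ++
      PySem.Int.toStr (PySem.Int.mod (PySem.Int.floordiv i p) 10) ++ "." ++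
      PySem.Int.toStr (PySem.Int.mod i p))

-- ===== PRECONDITION & SPEC =====
def Spec_generate_test_versions (count : Int) (out : List String) : Prop := out = generate_test_versions_alt count
instance (count : Int) (out : List String) : Decidable (Spec_generate_test_versions count out) := by unfold Spec_generate_test_versions; infer_instance

-- ===== CLAIM (what is proved, stated in full; the proofs are below) =====
def Claim_equal_generate_test_versions : Prop := ∀ (count : Int), Dom_generate_test_versions count → Spec_generate_test_versions count (generate_test_versions count)

-- ===== LEMMAS AND PROOFS =====

-- patch loop: if there is room for all items, it appends them all; the early-return flag
-- implies the accumulator has reached exactly `count`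
theorem pvPatchLoop_spec (count major minor : Int) (ps : List Int) (acc : List String)
    (h : (acc.length : Int) + ps.length ≤ count) :
    (pvPatchLoop count major minor ps acc).1 = acc ++ ps.map (pvStr major minor) ∧
    ((pvPatchLoop count major minor ps acc).2 = true →
      (((pvPatchLoop count major minor ps acc).1.length : Int) = count)) := by
  induction ps generalizing acc with
  | nil => simp [pvPatchLoop]
  | cons p rest ih =>
    simp only [pvPatchLoop]
    have hlen' : (acc ++ [pvStr major minor p]).length = acc.length + 1 := by simp
    by_cases hc : count ≤ (((acc ++ [pvStr major minor p]).length : Nat) : Int)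
    · rw [if_pos hc]
      rw [hlen'] at hc
      have hrest : rest = [] := by
        apply List.length_eq_zero_iff.mp
        simp only [List.length_cons] at h
        push_cast at h hc
        omega
      subst hrest
      refine ⟨by simp, fun _ => ?_⟩
      simp only [List.length_cons, List.length_nil] at h
      rw [hlen']
      push_cast at h hc ⊢
      omega
    · rw [if_neg hc]
      have h' : (((acc ++ [pvStr major minor p]).length : Nat) : Int) + rest.length ≤ count := by
        rw [hlen']
        simp only [List.length_cons] at h
        push_cast at h ⊢
        omega
      obtain ⟨h1, h2⟩ := ih _ h'
      refine ⟨?_, h2⟩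
      rw [h1]; simp

-- minor loop
theorem pvMinorLoop_spec (count major : Int) (ms : List Int) (acc : List String)
    (h : (acc.length : Int) +
        ms.length * (PySem.List.pyRange 0 (PySem.Int.floordiv count 100) 1).length ≤ count) :
    (pvMinorLoop count major ms acc).1 =
      acc ++ ms.flatMap (fun mi =>
        (PySem.List.pyRange 0 (PySem.Int.floordiv count 100) 1).map (pvStr major mi)) ∧
    ((pvMinorLoop count major ms acc).2 = true →
      (((pvMinorLoop count major ms acc).1.length : Int) = count)) := by
  set pr := PySem.List.pyRange 0 (PySem.Int.floordiv count 100) 1 with hpr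
  induction ms generalizing acc with
  | nil => simp [pvMinorLoop]
  | cons mi rest ih =>
    simp only [pvMinorLoop, ← hpr]
    simp only [List.length_cons] at h
    push_cast at h
    have hroom : (acc.length : Int) + pr.length ≤ count := by nlinarith [Int.ofNat_nonneg rest.length, Int.ofNat_nonneg pr.length]
    obtain ⟨h1, h2⟩ := pvPatchLoop_spec count major mi pr acc hroom
    by_cases hf : (pvPatchLoop count major mi pr acc).2 = true
    · rw [if_pos hf]
      have hlen := h2 hf
      rw [h1, List.length_append, List.length_map] at hlen
      push_cast at hlen
      have hz : rest.length * pr.length = 0 := by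
        have h0 : ((rest.length * pr.length : Nat) : Int) ≤ 0 := by push_cast; nlinarith
        exact Nat.cast_eq_zero.mp (le_antisymm h0 (by positivity))
      have hrest : rest.flatMap (fun mi => pr.map (pvStr major mi)) = [] := by
        rcases Nat.mul_eq_zero.mp hz with hr | hp
        · rw [List.length_eq_zero_iff.mp hr]; simp
        · rw [List.length_eq_zero_iff.mp hp]; simp
      refine ⟨?_, h2⟩
      rw [h1, List.flatMap_cons, hrest]; simp
    · rw [if_neg hf]
      have h' : ((pvPatchLoop count major mi pr acc).1.length : Int) + rest.length * pr.length ≤ count := by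
        rw [h1, List.length_append, List.length_map]; push_cast; nlinarith
      obtain ⟨g1, g2⟩ := ih _ h'
      refine ⟨?_, g2⟩
      rw [g1, h1]; simp

-- major loop
theorem pvMajorLoop_spec (count : Int) (mas : List Int) (acc : List String)
    (h : (acc.length : Int) +
        mas.length * (10 * (PySem.List.pyRange 0 (PySem.Int.floordiv count 100) 1).length) ≤ count) :
    (pvMajorLoop count mas acc).1 =
      acc ++ mas.flatMap (fun ma => (PySem.List.pyRange 0 10 1).flatMap (fun mi =>
        (PySem.List.pyRange 0 (PySem.Int.floordiv count 100) 1).map (pvStr ma mi))) := by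
  set pr := PySem.List.pyRange 0 (PySem.Int.floordiv count 100) 1 with hpr
  have h10 : PySem.List.pyRange 0 (10:Int) 1 = [0,1,2,3,4,5,6,7,8,9] := by decide
  have hF : ∀ ma : Int, ((PySem.List.pyRange 0 10 1).flatMap (fun mi => pr.map (pvStr ma mi))).length
      = 10 * pr.length := by
    intro ma
    rw [h10]
    simp only [List.flatMap_cons, List.flatMap_nil, List.append_nil, List.length_append,
      List.length_map]
    omega
  induction mas generalizing acc with
  | nil => simp [pvMajorLoop]
  | cons ma rest ih =>
    simp only [pvMajorLoop]
    simp only [List.length_cons] at h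
    push_cast at h
    have hroom : (acc.length : Int) +
        ((PySem.List.pyRange 0 10 1).length) * pr.length ≤ count := by
      rw [h10]
      simp only [List.length_cons, List.length_nil]
      push_cast
      nlinarith [Int.ofNat_nonneg rest.length, Int.ofNat_nonneg pr.length]
    obtain ⟨h1, h2⟩ := pvMinorLoop_spec count ma (PySem.List.pyRange 0 10 1) acc hroom
    rw [← hpr] at h1
    by_cases hf : (pvMinorLoop count ma (PySem.List.pyRange 0 10 1) acc).2 = true
    · rw [if_pos hf]
      have hlen := h2 hf
      rw [h1, List.length_append, hF ma] at hlen
      push_cast at hlen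
      have hz : rest.length * (10 * pr.length) = 0 := by
        have h0 : ((rest.length * (10 * pr.length) : Nat) : Int) ≤ 0 := by push_cast; nlinarith
        exact Nat.cast_eq_zero.mp (le_antisymm h0 (by positivity))
      have hrest : rest.flatMap (fun ma => (PySem.List.pyRange 0 10 1).flatMap
          (fun mi => pr.map (pvStr ma mi))) = [] := by
        rcases Nat.mul_eq_zero.mp hz with hr | hp
        · rw [List.length_eq_zero_iff.mp hr]; simp
        · have hp0 : pr = [] := List.length_eq_zero_iff.mp (by omega)
          simp [hp0]
      rw [h1, List.flatMap_cons, hrest]; simp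
    · rw [if_neg hf]
      have h' : ((pvMinorLoop count ma (PySem.List.pyRange 0 10 1) acc).1.length : Int)
          + rest.length * (10 * pr.length) ≤ count := by
        rw [h1, List.length_append, hF ma]
        push_cast
        nlinarith
      have g1 := ih _ h'
      rw [g1, h1]; simp

-- index-decoding: a range of length a*p maps through (i/p, i%p) to the nested enumeration
theorem range_decode {α : Type} (a p : Nat) (g : Nat → Nat → α) :
    (List.range (a * p)).map (fun i => g (i / p) (i % p)) =
      (List.range a).flatMap (fun m => (List.range p).map (fun j => g m j)) := by
  induction a with
  | zero => simp
  | succ a ih =>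
    have hsplit : (a + 1) * p = a * p + p := by ring
    rw [hsplit, List.range_add, List.map_append, List.map_map, ih,
        List.range_succ, List.flatMap_append]
    congr 1
    simp only [List.flatMap_cons, List.flatMap_nil, List.append_nil]
    apply List.map_congr_left
    intro j hj
    have hjp : j < p := List.mem_range.mp hj
    have hp : 0 < p := by omega
    simp only [Function.comp]
    have hd : (a * p + j) / p = a := by
      rw [Nat.add_comm, Nat.add_mul_div_right j a hp, Nat.div_eq_of_lt hjp]
      omega
    have hm : (a * p + j) % p = j := by
      rw [Nat.add_comm, Nat.add_mul_mod_self_right, Nat.mod_eq_of_lt hjp]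
    rw [hd, hm]

-- ===== VERDICT (by name: the statement is the Claim_ definition above) =====
theorem generate_test_versions_spec : Claim_equal_generate_test_versions := by
  intro count _
  unfold Spec_generate_test_versions
  have halt : generate_test_versions_alt count =
      (PySem.List.pyRange 0 (min count (100 * PySem.Int.floordiv count 100)) 1).map (fun i =>
        "v" ++ PySem.Int.toStr (PySem.Int.floordiv i (PySem.Int.floordiv count 100 * 10)) ++ "." ++
          PySem.Int.toStr (PySem.Int.mod (PySem.Int.floordiv i (PySem.Int.floordiv count 100)) 10) ++ "." ++
          PySem.Int.toStr (PySem.Int.mod i (PySem.Int.floordiv count 100))) := rfl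
  unfold generate_test_versions
  rw [halt]
  set P := PySem.Int.floordiv count 100 with hP
  have hmod : P * 100 + PySem.Int.mod count 100 = count := PySem.Int.floordiv_mul_add_mod count 100
  have hmodrange : 0 ≤ PySem.Int.mod count 100 ∧ PySem.Int.mod count 100 < 100 := by
    rw [PySem.Int.mod_eq_emod_of_pos (by norm_num : (0:Int) < 100)]
    exact ⟨Int.emod_nonneg count (by norm_num), Int.emod_lt_of_pos count (by norm_num)⟩
  have h100 : 100 * P ≤ count := by omega
  by_cases hPpos : 0 < P
  · -- main case: at least 100 versions requested
    have hmin : min count (100 * P) = 100 * P := min_eq_right h100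
    rw [hmin]
    set q := P.toNat with hq
    have hqP : (q : Int) = P := Int.toNat_of_nonneg (le_of_lt hPpos)
    have hq0 : 0 < q := by omega
    -- A side: no early return fires before the end, so A returns the full nested list
    have hlen : ((PySem.List.pyRange 0 P 1).length : Int) = P := by
      rw [PySem.List.length_pyRange_one]; omega
    have hA := pvMajorLoop_spec count (PySem.List.pyRange 0 10 1) []
      (by
        have h10 : (PySem.List.pyRange 0 (10:Int) 1).length = 10 := by decide
        rw [← hP]
        simp only [List.length_nil]
        rw [h10]
        push_cast
        nlinarith [hlen, h100])
    rw [← hP] at hA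
    rw [hA, List.nil_append]
    -- normalize both sides to Nat ranges
    have hr10 : PySem.List.pyRange 0 10 1 = List.map (fun (k : Nat) => (k : Int)) (List.range 10) := by decide
    have hrP : PySem.List.pyRange 0 P 1 = List.map (fun (k : Nat) => (k : Int)) (List.range q) := by
      rw [PySem.List.pyRange_one, show (P - (0:Int)).toNat = q from by omega]
      simp
    have hrN : PySem.List.pyRange 0 (100 * P) 1 = List.map (fun (k : Nat) => (k : Int)) (List.range (100 * q)) := by
      rw [PySem.List.pyRange_one, show (100 * P - (0:Int)).toNat = 100 * q from by omega]
      simp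
    rw [hr10, hrP, hrN]
    simp only [List.flatMap_map, List.map_map, Function.comp_def]
    -- B side: rewrite the decoded function into Nat arithmetic
    have hdec : ∀ k : Nat,
        ("v" ++ PySem.Int.toStr (PySem.Int.floordiv (k : Int) (P * 10)) ++ "." ++
          PySem.Int.toStr (PySem.Int.mod (PySem.Int.floordiv (k : Int) P) 10) ++ "." ++
          PySem.Int.toStr (PySem.Int.mod (k : Int) P)) =
        pvStr ((k / (10 * q) : Nat) : Int) (((k % (10 * q)) / q : Nat) : Int)
          (((k % (10 * q)) % q : Nat) : Int) := by
      intro k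
      have e1 : PySem.Int.floordiv (k : Int) (P * 10) = ((k / (10 * q) : Nat) : Int) := by
        have hPten : P * 10 = ((10 * q : Nat) : Int) := by push_cast; omega
        rw [hPten, PySem.Int.floordiv_natCast]
      have e2 : PySem.Int.mod (PySem.Int.floordiv (k : Int) P) 10 = (((k % (10 * q)) / q : Nat) : Int) := by
        have hP' : P = ((q : Nat) : Int) := by omega
        rw [hP', PySem.Int.floordiv_natCast,
          show (10 : Int) = ((10 : Nat) : Int) from by norm_num, PySem.Int.mod_natCast]
        congr 1
        -- (k / q) % 10 = (k % (10*q)) / q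
        conv_lhs => rw [← Nat.div_add_mod k (10 * q)]
        rw [show 10 * q * (k / (10 * q)) + k % (10 * q)
              = k % (10 * q) + k / (10 * q) * 10 * q from by ring,
            Nat.add_mul_div_right _ _ hq0, Nat.add_mul_mod_self_right]
        refine Nat.mod_eq_of_lt (Nat.div_lt_of_lt_mul ?_)
        have := Nat.mod_lt k (show 0 < 10 * q by omega)
        omega
      have e3 : PySem.Int.mod (k : Int) P = (((k % (10 * q)) % q : Nat) : Int) := by
        have hP' : P = ((q : Nat) : Int) := by omega
        rw [hP', PySem.Int.mod_natCast]
        congr 1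
        exact (Nat.mod_mod_of_dvd k ⟨10, by ring⟩).symm
      rw [e1, e2, e3]; rfl
    have hmapB : (List.range (100 * q)).map (fun k =>
          "v" ++ PySem.Int.toStr (PySem.Int.floordiv ((k : Nat) : Int) (P * 10)) ++ "." ++
            PySem.Int.toStr (PySem.Int.mod (PySem.Int.floordiv ((k : Nat) : Int) P) 10) ++ "." ++
            PySem.Int.toStr (PySem.Int.mod ((k : Nat) : Int) P)) =
        (List.range (100 * q)).map (fun k =>
          pvStr ((k / (10 * q) : Nat) : Int) (((k % (10 * q)) / q : Nat) : Int)
            (((k % (10 * q)) % q : Nat) : Int)) := by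
      apply List.map_congr_left
      intro k _
      exact hdec k
    rw [show (100 : Int) * P = ((100 * q : Nat) : Int) from by push_cast; omega] at hrN
    rw [hmapB]
    rw [show 100 * q = 10 * (10 * q) from by ring,
      range_decode 10 (10 * q)
        (fun m j => pvStr (m : Int) ((j / q : Nat) : Int) ((j % q : Nat) : Int))]
    refine List.flatMap_congr ?_
    intro m _
    exact (range_decode 10 q (fun b c => pvStr (m : Int) (b : Int) (c : Int))).symm
  · -- fewer than 100 requested (or nonpositive): both sides are empty
    have hple : P ≤ 0 := by omega
    have hprnil : PySem.List.pyRange 0 (PySem.Int.floordiv count 100) 1 = [] := by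
      rw [← hP]; exact PySem.List.pyRange_one_eq_nil hple
    have hminor : ∀ (ma : Int) (ms : List Int) (acc : List String),
        pvMinorLoop count ma ms acc = (acc, false) := by
      intro ma ms
      induction ms with
      | nil => intro acc; simp [pvMinorLoop]
      | cons mi rest ih =>
        intro acc
        simp only [pvMinorLoop]
        rw [hprnil]
        simp only [pvPatchLoop]
        simp [ih]
    have hmajor : ∀ (mas : List Int) (acc : List String),
        pvMajorLoop count mas acc = (acc, false) := by
      intro mas
      induction mas with
      | nil => intro acc; simp [pvMajorLoop]
      | cons ma rest ih =>
        intro acc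
        simp [pvMajorLoop, hminor, ih]
    rw [hmajor]
    have hn : min count (100 * P) ≤ 0 := le_trans (min_le_right _ _) (by omega)
    rw [PySem.List.pyRange_one_eq_nil hn, List.map_nil]
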